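-- pv_equiv track=rewrite | github.com/marinagomes02/AdventOfCode2024 | 3/solution-part1.py | check_is_valid_number
-- ===== SOURCE A (Python) =====
-- def check_is_valid_number(line: str, i: int) -> tuple:
--     number_str = ''
--     nr_digits = 0
--     for j in range(i, len(line)):
--
--         if line[j].isdigit():
--             if nr_digits == 3:
--                 return False, ''
--             number_str += line[j]
--             nr_digits += 1
--             continue
--
--         elif line[j] == ',' or line[j] == ')':
--             if nr_digits > 0 and nr_digits <= 3:
--                 return True, number_str
--             else:
--                 return False, ''
--
--         else:
--             return False, ''
--     return False, ''
-- ===== SOURCE B (Python) =====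
-- def check_is_valid_number(line: str, i: int) -> tuple:
--     # Try each candidate length L = 1, 2, 3: the match is valid iff the L
--     # characters at i..i+L-1 are all digits and the next character is a delimiter.
--     n = len(line)
--     for L in (1, 2, 3):
--         if i + L < n and all(line[i + t].isdigit() for t in range(L)) \
--                 and line[i + L] in (',', ')'):
--             return True, ''.join(line[i + t] for t in range(L))
--     return False, ''
-- ===== Notes on version B (the rewrite author's own statement) =====
-- stated objective: alternative
-- what changed: A is a stateful left-to-right scan (digit counter, accumulated string, three early-return branches); B instead tries each candidate match length L in (1,2,3) and for each makes one declarative check: L digits at i..i+L-1 followed by a ',' or ')' delimiter.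
import Mathlib
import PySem

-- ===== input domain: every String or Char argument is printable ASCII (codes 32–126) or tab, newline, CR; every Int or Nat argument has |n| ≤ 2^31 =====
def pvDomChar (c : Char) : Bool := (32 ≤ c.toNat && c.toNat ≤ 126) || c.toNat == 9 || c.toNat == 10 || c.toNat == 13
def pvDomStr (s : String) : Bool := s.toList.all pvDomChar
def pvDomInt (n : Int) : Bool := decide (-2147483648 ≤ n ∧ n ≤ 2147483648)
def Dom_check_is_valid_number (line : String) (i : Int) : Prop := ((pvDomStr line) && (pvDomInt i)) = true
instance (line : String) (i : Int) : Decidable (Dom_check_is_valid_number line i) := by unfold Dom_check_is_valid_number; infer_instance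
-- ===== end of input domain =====

-- B replaces A's stateful digit-counting scan by three staged candidate-length checks
-- (for L in 1..3: digits at i..i+L-1, delimiter at i+L); equivalence of return values proved on Pre_.

-- ===== PORT A =====
-- loop of A: iterates j over range(i, len(line)) carrying (number_str, nr_digits)
def aLoop (cs : List Char) : List Int → List Char → Int → Bool × String
  | [], _, _ => (false, "")
  | j :: js, number_str, nr_digits =>
    match PySem.List.pyGet? cs j with
    | none => (false, "")   -- IndexError (excluded by Pre_)
    | some c =>
      if PySem.Chars.isdigit c then
        if nr_digits == 3 then (false, "")
        else aLoop cs js (number_str ++ [c]) (nr_digits + 1)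
      else if c == ',' || c == ')' then
        if nr_digits > 0 && nr_digits ≤ 3 then (true, String.mk number_str) else (false, "")
      else (false, "")

def check_is_valid_number (line : String) (i : Int) : Bool × String :=
  aLoop line.toList (PySem.List.pyRange i (PySem.Str.len line) 1) [] 0

-- ===== PORT B =====
-- the compound condition of B's `if`: i+L < n, all of line[i..i+L-1] digits, line[i+L] a delimiter
def bCheckL (cs : List Char) (i L : Int) : Bool :=
  decide (i + L < (cs.length : Int)) &&
  (PySem.List.pyRange 0 L 1).all (fun t =>
     match PySem.List.pyGet? cs (i + t) with
     | some c => PySem.Chars.isdigit c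
     | none => false) &&   -- none = IndexError (excluded by Pre_)
  (match PySem.List.pyGet? cs (i + L) with
   | some c => c == ',' || c == ')'
   | none => false)

-- ''.join(line[i+t] for t in range(L))
def bNum (cs : List Char) (i L : Int) : String :=
  String.mk ((PySem.List.pyRange 0 L 1).filterMap (fun t => PySem.List.pyGet? cs (i + t)))

-- B's `for L in (1, 2, 3)` with early return
def bForL (cs : List Char) (i : Int) : List Int → Bool × String
  | [] => (false, "")
  | L :: Ls => if bCheckL cs i L then (true, bNum cs i L) else bForL cs i Ls

def check_is_valid_number_alt (line : String) (i : Int) : Bool × String :=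
  bForL line.toList i [1, 2, 3]

-- ===== PRECONDITION & SPEC =====
-- Pre_ excludes only i < -len(line): there A raises IndexError (negative-index
-- wraparound past the start of the string) on its first character read.
def Pre_check_is_valid_number (line : String) (i : Int) : Prop :=
  -(PySem.Str.len line) ≤ i
instance (line : String) (i : Int) : Decidable (Pre_check_is_valid_number line i) := by
  unfold Pre_check_is_valid_number; infer_instance
def pvWitness_check_is_valid_number : String × Int := ("mul(12,34)", 4)

def Spec_check_is_valid_number (line : String) (i : Int) (out : Bool × String) : Prop := out = check_is_valid_number_alt line i
instance (line : String) (i : Int) (out : Bool × String) : Decidable (Spec_check_is_valid_number line i out) := by unfold Spec_check_is_valid_number; infer_instance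

-- ===== CLAIM (what is proved, stated in full; the proofs are below) =====
def Claim_equal_check_is_valid_number : Prop := ∀ (line : String) (i : Int), Dom_check_is_valid_number line i → Pre_check_is_valid_number line i → Spec_check_is_valid_number line i (check_is_valid_number line i)

-- ===== LEMMAS AND PROOFS =====

lemma pyGet_some_of_inrange (cs : List Char) (j : Int)
    (h1 : -(cs.length : Int) ≤ j) (h2 : j < (cs.length : Int)) :
    ∃ c, PySem.List.pyGet? cs j = some c := by
  rcases hc : PySem.List.pyGet? cs j with _ | c
  · rw [PySem.List.pyGet?_eq_none_iff] at hc
    exact absurd ⟨h1, h2⟩ hc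
  · exact ⟨c, rfl⟩

lemma digit_ne_delim (c : Char) (h : PySem.Chars.isdigit c = true) :
    (c == ',' || c == ')') = false := by
  simp only [Bool.or_eq_false_iff, beq_eq_false_iff_ne]
  constructor <;> rintro rfl <;> exact absurd h (by decide)

lemma range01 : PySem.List.pyRange 0 1 1 = [0] := by decide
lemma range02 : PySem.List.pyRange 0 2 1 = [0, 1] := by decide
lemma range03 : PySem.List.pyRange 0 3 1 = [0, 1, 2] := by decide

-- step3: three digits already consumed at i, i+1, i+2
lemma step3 (cs : List Char) (i : Int) (hi : -(cs.length : Int) ≤ i)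
    (c0 c1 c2 : Char)
    (h0 : PySem.List.pyGet? cs i = some c0) (d0 : PySem.Chars.isdigit c0 = true)
    (h1 : PySem.List.pyGet? cs (i + 1) = some c1) (d1 : PySem.Chars.isdigit c1 = true)
    (h2 : PySem.List.pyGet? cs (i + 2) = some c2) (d2 : PySem.Chars.isdigit c2 = true) :
    aLoop cs (PySem.List.pyRange (i + 3) cs.length 1) [c0, c1, c2] 3 = bForL cs i [1, 2, 3] := by
  by_cases hlt : i + 3 < (cs.length : Int)
  · obtain ⟨c3, h3⟩ := pyGet_some_of_inrange cs (i + 3) (by omega) hlt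
    rw [PySem.List.pyRange_one_cons hlt]
    simp only [aLoop, h3]
    by_cases hd3 : PySem.Chars.isdigit c3 = true
    · simp [bForL, bCheckL, range01, range02, range03, h0, h1, h2, h3, d0, d1, d2, hd3,
        digit_ne_delim _ d1, digit_ne_delim _ d2, digit_ne_delim _ hd3]
    · simp [bForL, bCheckL, bNum, range01, range02, range03, h0, h1, h2, h3, d0, d1, d2, hd3,
        digit_ne_delim _ d1, digit_ne_delim _ d2, hlt]
  · rw [PySem.List.pyRange_one_eq_nil (by omega)]
    simp only [aLoop]
    simp [bForL, bCheckL, range01, range02, range03, h0, h1, h2, d0, d1, d2,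
      digit_ne_delim _ d1, digit_ne_delim _ d2, hlt]

-- step2: two digits consumed at i, i+1
lemma step2 (cs : List Char) (i : Int) (hi : -(cs.length : Int) ≤ i)
    (c0 c1 : Char)
    (h0 : PySem.List.pyGet? cs i = some c0) (d0 : PySem.Chars.isdigit c0 = true)
    (h1 : PySem.List.pyGet? cs (i + 1) = some c1) (d1 : PySem.Chars.isdigit c1 = true) :
    aLoop cs (PySem.List.pyRange (i + 2) cs.length 1) [c0, c1] 2 = bForL cs i [1, 2, 3] := by
  by_cases hlt : i + 2 < (cs.length : Int)
  · obtain ⟨c2, h2⟩ := pyGet_some_of_inrange cs (i + 2) (by omega) hlt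
    rw [PySem.List.pyRange_one_cons hlt]
    simp only [aLoop, h2]
    by_cases hd2 : PySem.Chars.isdigit c2 = true
    · have := step3 cs i hi c0 c1 c2 h0 d0 h1 d1 h2 hd2
      simp only [hd2, if_true]
      have harith : i + 2 + 1 = i + 3 := by ring
      rw [harith] at *
      simpa using this
    · simp [bForL, bCheckL, bNum, range01, range02, range03, h0, h1, h2, d0, d1, hd2,
        digit_ne_delim _ d1, hlt]
  · rw [PySem.List.pyRange_one_eq_nil (by omega)]
    simp only [aLoop]
    simp [bForL, bCheckL, range01, range02, range03, h0, h1, d0, d1,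
      digit_ne_delim _ d1, hlt, show ¬ i + 3 < (cs.length : Int) by omega]

-- step1: one digit consumed at i
lemma step1 (cs : List Char) (i : Int) (hi : -(cs.length : Int) ≤ i)
    (c0 : Char)
    (h0 : PySem.List.pyGet? cs i = some c0) (d0 : PySem.Chars.isdigit c0 = true) :
    aLoop cs (PySem.List.pyRange (i + 1) cs.length 1) [c0] 1 = bForL cs i [1, 2, 3] := by
  by_cases hlt : i + 1 < (cs.length : Int)
  · obtain ⟨c1, h1⟩ := pyGet_some_of_inrange cs (i + 1) (by omega) hlt
    rw [PySem.List.pyRange_one_cons hlt]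
    simp only [aLoop, h1]
    by_cases hd1 : PySem.Chars.isdigit c1 = true
    · have := step2 cs i hi c0 c1 h0 d0 h1 hd1
      simp only [hd1, if_true]
      have harith : i + 1 + 1 = i + 2 := by ring
      rw [harith] at *
      simpa using this
    · simp [bForL, bCheckL, bNum, range01, range02, range03, h0, h1, d0, hd1, hlt]
  · rw [PySem.List.pyRange_one_eq_nil (by omega)]
    simp only [aLoop]
    simp [bForL, bCheckL, range01, range02, range03, h0, d0, hlt,
      show ¬ i + 2 < (cs.length : Int) by omega, show ¬ i + 3 < (cs.length : Int) by omega]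

-- step0: nothing consumed yet
lemma step0 (cs : List Char) (i : Int) (hi : -(cs.length : Int) ≤ i) :
    aLoop cs (PySem.List.pyRange i cs.length 1) [] 0 = bForL cs i [1, 2, 3] := by
  by_cases hlt : i < (cs.length : Int)
  · obtain ⟨c0, h0⟩ := pyGet_some_of_inrange cs i hi hlt
    rw [PySem.List.pyRange_one_cons hlt]
    simp only [aLoop, h0]
    by_cases hd0 : PySem.Chars.isdigit c0 = true
    · have := step1 cs i hi c0 h0 hd0
      simp only [hd0, if_true]
      simpa using this
    · simp [bForL, bCheckL, range01, range02, range03, h0, hd0]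
  · rw [PySem.List.pyRange_one_eq_nil (by omega)]
    simp only [aLoop]
    simp [bForL, bCheckL, range01, range02, range03,
      show ¬ i + 1 < (cs.length : Int) by omega, show ¬ i + 2 < (cs.length : Int) by omega,
      show ¬ i + 3 < (cs.length : Int) by omega]

-- ===== VERDICT (by name: the statement is the Claim_ definition above) =====
theorem check_is_valid_number_spec : Claim_equal_check_is_valid_number := by
  intro line i _ hpre
  unfold Spec_check_is_valid_number check_is_valid_number check_is_valid_number_alt
  unfold Pre_check_is_valid_number at hpre
  rw [PySem.Str.len_eq] at *
  exact step0 line.toList i (by simpa using hpre)
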